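-- pv_equiv track=rewrite | github.com/basupatil1213/dsa-python | code/stacks/advanced.py | append_animals
-- ===== SOURCE A (Python) =====
-- def append_animals(available, preferred):
--     preferred_length = len(preferred)
--
--     l = i = 0
--
--     while i < len(available) and l < preferred_length:
--         if available[i] == preferred[l]:
--             l += 1
--         i += 1
--
--     return preferred_length - l
-- ===== SOURCE B (Python) =====
-- def append_animals(available, preferred):
--     # Inverted index: map each item to the list of its positions in available,
--     # then walk preferred keeping a threshold cur; match at the first recorded
--     # position >= cur, stop at the first preferred item with no such position.
--     pos = {}
--     for i, a in enumerate(available):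
--         pos.setdefault(a, []).append(i)
--     cur = 0
--     matched = 0
--     for p in preferred:
--         nxt = next((j for j in pos.get(p, ()) if j >= cur), None)
--         if nxt is None:
--             break
--         cur = nxt + 1
--         matched += 1
--     return len(preferred) - matched
-- ===== Notes on version B (the rewrite author's own statement) =====
-- stated objective: alternative
-- what changed: Replaces A's two-pointer scan of available with an inverted index (dict item -> list of positions) built once; preferred is then matched by taking, per item, the first recorded position >= a moving threshold, so available is never scanned element-by-element during matching.
import Mathlib
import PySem

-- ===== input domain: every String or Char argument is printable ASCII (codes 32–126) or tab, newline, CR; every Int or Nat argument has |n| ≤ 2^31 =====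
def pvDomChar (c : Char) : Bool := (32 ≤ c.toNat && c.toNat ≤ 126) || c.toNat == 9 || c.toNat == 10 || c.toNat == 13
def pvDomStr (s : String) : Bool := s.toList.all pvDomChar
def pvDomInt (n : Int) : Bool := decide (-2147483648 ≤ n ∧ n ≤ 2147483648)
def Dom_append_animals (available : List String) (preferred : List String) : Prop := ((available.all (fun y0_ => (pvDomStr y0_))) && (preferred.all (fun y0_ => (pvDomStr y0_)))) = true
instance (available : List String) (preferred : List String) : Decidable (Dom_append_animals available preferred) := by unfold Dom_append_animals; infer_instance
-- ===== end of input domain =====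

-- B builds an inverted index of positions once and matches preferred via a moving threshold into the occurrence lists, instead of A's two-index scan of available; alternative algorithm, similar cost.


-- ===== PORT A =====
-- the while loop: walk `available` (i) keeping the pointer l into `preferred`
def aLoop (preferred : List String) : List String → Nat → Nat
  | [], l => l
  | a :: rest, l =>
    if h : l < preferred.length then
      if a = preferred[l] then aLoop preferred rest (l + 1) else aLoop preferred rest l
    else l

def append_animals (available : List String) (preferred : List String) : Int :=
  (preferred.length : Int) - (aLoop preferred available 0 : Nat)

-- ===== PORT B =====
-- pos = {}; for i, a in enumerate(available): pos.setdefault(a, []).append(i)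
def buildPos (available : List String) : PySem.Dict String (List Int) :=
  (PySem.List.enumerate available).foldl
    (fun d ia => d.modify ia.2 [] (· ++ [ia.1])) PySem.Dict.empty

-- the for-loop over preferred: nxt = first recorded position >= cur, break if none
def bLoop (pos : PySem.Dict String (List Int)) : List String → Int → Nat → Nat
  | [], _, matched => matched
  | p :: ps, cur, matched =>
    match (pos.getD p []).find? (fun j => decide (cur ≤ j)) with
    | some j => bLoop pos ps (j + 1) (matched + 1)
    | none => matched

def append_animals_alt (available : List String) (preferred : List String) : Int :=
  (preferred.length : Int) - (bLoop (buildPos available) preferred 0 0 : Nat)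

-- ===== PRECONDITION & SPEC =====
def Spec_append_animals (available : List String) (preferred : List String) (out : Int) : Prop := out = append_animals_alt available preferred
instance (available : List String) (preferred : List String) (out : Int) : Decidable (Spec_append_animals available preferred out) := by unfold Spec_append_animals; infer_instance

-- ===== CLAIM (what is proved, stated in full; the proofs are below) =====
def Claim_equal_append_animals : Prop := ∀ (available : List String) (preferred : List String), Dom_append_animals available preferred → Spec_append_animals available preferred (append_animals available preferred)

-- ===== LEMMAS AND PROOFS =====

-- common reference function: length of the longest prefix of pf that greedily
-- matches as a subsequence of av (stop at the first unmatched item)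
def bFind : List String → String → Option (List String)
  | [], _ => none
  | a :: rest, p => if a = p then some rest else bFind rest p

def greedy : List String → List String → Nat
  | _, [] => 0
  | av, p :: ps =>
    match bFind av p with
    | some rest => 1 + greedy rest ps
    | none => 0

-- ---- A-side: aLoop = greedy ----
theorem aLoop_eq_greedy (av : List String) (pf : List String) (l : Nat) (hl : l ≤ pf.length) :
    aLoop pf av l = l + greedy av (pf.drop l) := by
  induction av generalizing l with
  | nil =>
    cases Nat.lt_or_ge l pf.length with
    | inl h =>
      rw [List.drop_eq_getElem_cons h]
      simp [aLoop, greedy, bFind]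
    | inr h =>
      have : pf.drop l = [] := List.drop_eq_nil_of_le h
      simp [aLoop, this, greedy]
  | cons a rest ih =>
    by_cases h : l < pf.length
    · have hdrop : pf.drop l = pf[l] :: pf.drop (l + 1) := List.drop_eq_getElem_cons h
      by_cases he : a = pf[l]
      · rw [hdrop]
        simp only [aLoop, dif_pos h, if_pos he, greedy, bFind]
        rw [ih (l + 1) h]
        omega
      · rw [hdrop]
        simp only [aLoop, dif_pos h, greedy, bFind, if_neg he]
        have : (match bFind rest (pf[l]) with
            | some r => 1 + greedy r (pf.drop (l + 1))
            | none => 0) = greedy rest (pf.drop l) := by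
          rw [hdrop]; simp [greedy]
        rw [this]
        exact ih l hl
    · have hl' : l = pf.length := by omega
      have hdrop : pf.drop l = [] := by simp [hl']
      simp [aLoop, hl', greedy]

-- ---- B-side ----
-- reference position list: absolute indices (offset off) of p in av
def posF : List String → Nat → String → List Int
  | [], _, _ => []
  | a :: rest, off, p =>
    (if a = p then [(off : Int)] else []) ++ posF rest (off + 1) p

-- find p in av, returning the absolute index (offset k)
def fFind : List String → Nat → String → Option Nat
  | [], _, _ => none
  | a :: rest, idx, p => if a = p then some idx else fFind rest (idx + 1) p

theorem buildPos_fold (l : List (Int × String)) (d : PySem.Dict String (List Int)) (p : String) :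
    (l.foldl (fun d ia => d.modify ia.2 [] (· ++ [ia.1])) d).getD p [] =
      d.getD p [] ++ (l.filter (fun ia => ia.2 == p)).map (·.1) := by
  induction l generalizing d with
  | nil => simp
  | cons ia rest ih =>
    simp only [List.foldl_cons, ih, List.filter_cons]
    rw [PySem.Dict.getD_modify]
    by_cases h : ia.2 = p
    · simp [h]
    · simp [h, Ne.symm h]

theorem enumerate_filter_eq_posF (av : List String) (off : Nat) (p : String) :
    ((PySem.List.enumerate av ((off : Nat) : Int)).filter (fun ia => ia.2 == p)).map (·.1) =
      posF av off p := by
  induction av generalizing off with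
  | nil => simp [posF, PySem.List.enumerate_nil]
  | cons a rest ih =>
    rw [PySem.List.enumerate_cons]
    have : ((off : Nat) : Int) + 1 = (((off + 1 : Nat)) : Int) := by push_cast; ring
    rw [List.filter_cons, this]
    by_cases h : a = p
    · simp only [posF, if_pos h]
      simp [h]
      simpa using ih (off + 1)
    · simp only [posF, if_neg h]
      simp [h]
      simpa using ih (off + 1)

theorem buildPos_getD (av : List String) (p : String) :
    (buildPos av).getD p [] = posF av 0 p := by
  have h0 : ((0 : Nat) : Int) = (0 : Int) := rfl
  rw [buildPos, buildPos_fold, ← h0, enumerate_filter_eq_posF]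
  simp

-- find? with threshold off+d on posF av off skips the first d elements of av
theorem posF_find_shift (p : String) (d : Nat) :
    ∀ (av : List String) (off : Nat),
    (posF av off p).find? (fun j => decide (((off + d : Nat) : Int) ≤ j)) =
      (posF (av.drop d) (off + d) p).find? (fun j => decide (((off + d : Nat) : Int) ≤ j)) := by
  induction d with
  | zero => intro av off; simp
  | succ d ih =>
    intro av off
    cases av with
    | nil => simp [posF]
    | cons a rest =>
      have hlt : ¬ (((off + (d + 1) : Nat) : Int) ≤ ((off : Nat) : Int)) := by push_cast; omega
      have step : (posF (a :: rest) off p).find? (fun j => decide (((off + (d + 1) : Nat) : Int) ≤ j)) =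
          (posF rest (off + 1) p).find? (fun j => decide (((off + (d + 1) : Nat) : Int) ≤ j)) := by
        by_cases h : a = p
        · simp [posF, h]
        · simp [posF, h]
      rw [step, List.drop_succ_cons]
      have harith : off + (d + 1) = (off + 1) + d := by omega
      rw [harith] at *
      exact ih rest (off + 1)

-- with threshold ≤ offset, find? returns the first recorded position = fFind
theorem posF_find_head (av : List String) (p : String) (k off : Nat) (hk : k ≤ off) :
    (posF av off p).find? (fun j => decide (((k : Nat) : Int) ≤ j)) =
      (fFind av off p).map (fun n => ((n : Nat) : Int)) := by
  induction av generalizing off with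
  | nil => simp [posF, fFind]
  | cons a rest ih =>
    by_cases h : a = p
    · have : ((k : Nat) : Int) ≤ ((off : Nat) : Int) := by omega
      simp [posF, fFind, h, this]
    · simp only [posF, fFind, if_neg h, List.nil_append]
      exact ih (off + 1) (by omega)

theorem fFind_ge (av : List String) (p : String) (k j : Nat) (h : fFind av k p = some j) : k ≤ j := by
  induction av generalizing k with
  | nil => simp [fFind] at h
  | cons a rest ih =>
    by_cases ha : a = p
    · simp [fFind, ha] at h; omega
    · simp only [fFind, if_neg ha] at h
      have := ih (k + 1) h
      omega

theorem bFind_eq_fFind (av : List String) (p : String) (k : Nat) :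
    bFind av p = (fFind av k p).map (fun j => av.drop (j + 1 - k)) := by
  induction av generalizing k with
  | nil => simp [bFind, fFind]
  | cons a rest ih
  => by_cases ha : a = p
     · simp [bFind, fFind, ha]
     · simp only [bFind, fFind, if_neg ha]
       rw [ih (k + 1)]
       cases hf : fFind rest (k + 1) p with
       | none => simp
       | some j =>
         have hj : k + 1 ≤ j := fFind_ge rest p (k + 1) j hf
         have : j + 1 - k = (j - k) + 1 := by omega
         have h2 : j + 1 - (k + 1) = j - k := by omega
         simp [this]

-- the B loop computes greedy on the remaining suffix of av
theorem bLoop_eq_greedy (av : List String) (pf : List String) (k matched : Nat) :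
    bLoop (buildPos av) pf ((k : Nat) : Int) matched = matched + greedy (av.drop k) pf := by
  induction pf generalizing k matched with
  | nil => simp [bLoop, greedy]
  | cons p ps ih =>
    have hfind : ((buildPos av).getD p []).find? (fun j => decide (((k : Nat) : Int) ≤ j)) =
        (fFind (av.drop k) k p).map (fun n => ((n : Nat) : Int)) := by
      rw [buildPos_getD]
      calc (posF av 0 p).find? (fun j => decide (((k : Nat) : Int) ≤ j))
          = (posF (av.drop k) k p).find? (fun j => decide (((k : Nat) : Int) ≤ j)) := by
            simpa using posF_find_shift p k av 0
        _ = (fFind (av.drop k) k p).map (fun n => ((n : Nat) : Int)) :=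
            posF_find_head (av.drop k) p k k le_rfl
    cases hf : fFind (av.drop k) k p with
    | none =>
      have hb : bFind (av.drop k) p = none := by rw [bFind_eq_fFind (av.drop k) p k, hf]; rfl
      simp only [bLoop, hfind, hf, Option.map_none, greedy, hb]
      omega
    | some j =>
      have hj : k ≤ j := fFind_ge (av.drop k) p k j hf
      have hb : bFind (av.drop k) p = some (av.drop (j + 1)) := by
        rw [bFind_eq_fFind (av.drop k) p k, hf]
        simp only [Option.map_some]
        congr 1
        rw [List.drop_drop]
        congr 1
        omega
      have hcast : ((j : Nat) : Int) + 1 = (((j + 1 : Nat)) : Int) := by push_cast; ring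
      simp only [bLoop, hfind, hf, Option.map_some, greedy, hb, hcast, ih]
      omega

-- ===== VERDICT (by name: the statement is the Claim_ definition above) =====
theorem append_animals_spec : Claim_equal_append_animals := by
  intro av pf _
  unfold Spec_append_animals append_animals append_animals_alt
  rw [aLoop_eq_greedy av pf 0 (Nat.zero_le _)]
  have h0 : (0 : Int) = ((0 : Nat) : Int) := rfl
  rw [h0, bLoop_eq_greedy av pf 0 0]
  simp
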